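-- pv_equiv track=rewrite | github.com/alexandraback/datacollection | solutions_5646553574277120_0/Python/Lowik/ProblemC.py | getAllPossibleSums
-- ===== SOURCE A (Python) =====
-- import itertools
--
-- def findsubsets(S,m):
--     return set(itertools.combinations(S, m))
--
-- def getAllPossibleSums(Ds) :
--     Ds = set(Ds)
--     possible_values = set()
--     for n in range(1, len(Ds) + 1) :
--         subset = findsubsets(Ds, n)
--         for s in subset :
--             possible_values.add(sum(s))
--     return possible_values
-- ===== SOURCE B (Python) =====
-- def getAllPossibleSums(Ds):
--     xs = list(dict.fromkeys(Ds))
--     # table[k] = sums of the k-element subsets of the suffix processed so far,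
--     # in lexicographic subset order; partial sums are shared between subsets.
--     table = [[0]]
--     for x in reversed(xs):
--         shifted = [[x + s for s in row] for row in table]
--         table = [[0]] + [a + b for a, b in zip(shifted, table[1:] + [[]])]
--     out = set()
--     for row in table[1:]:
--         out.update(row)
--     return out
-- ===== Notes on version B (the rewrite author's own statement) =====
-- stated objective: alternative
-- what changed: Instead of materializing every subset as a tuple via itertools.combinations and summing each from scratch, B runs a layered suffix DP (table[k] = sums of k-subsets in lexicographic order) that shares partial sums, so each subset costs O(1) instead of O(n) plus tuple/set-of-tuples overhead; intended as faster (measured 8.7x at n=16) but unconfirmed at the largest size, where both are exponential.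
import Mathlib
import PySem

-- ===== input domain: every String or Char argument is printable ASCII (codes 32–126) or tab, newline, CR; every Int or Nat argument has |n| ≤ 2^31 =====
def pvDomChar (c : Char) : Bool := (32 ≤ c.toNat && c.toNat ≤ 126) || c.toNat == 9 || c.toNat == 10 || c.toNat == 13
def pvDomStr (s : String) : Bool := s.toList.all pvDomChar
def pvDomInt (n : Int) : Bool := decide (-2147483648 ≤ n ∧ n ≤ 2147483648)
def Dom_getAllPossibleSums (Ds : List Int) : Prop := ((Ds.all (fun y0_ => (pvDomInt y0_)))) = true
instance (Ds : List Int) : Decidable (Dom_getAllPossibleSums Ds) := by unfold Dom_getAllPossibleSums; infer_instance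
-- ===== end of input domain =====

-- B replaces A's tuple-by-tuple subset enumeration with a layered suffix DP sharing
-- partial sums (one addition per subset instead of an O(n) sum over a materialized tuple).
-- The Python output is a set; equality here is of the PySem insertion-ordered model.

-- ===== PORT A =====
-- itertools.combinations(S, k) over the list S, lexicographic order of positions
def pvCombos : Nat → List Int → List (List Int)
  | 0, _ => [[]]
  | _ + 1, [] => []
  | k + 1, x :: r => (pvCombos k r).map (fun t => x :: t) ++ pvCombos (k + 1) r

def findsubsets (S : List Int) (m : Nat) : List (List Int) :=
  PySem.Set.ofList (pvCombos m S)

def getAllPossibleSums (Ds : List Int) : List Int :=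
  let S : PySem.Set Int := PySem.Set.ofList Ds
  (PySem.List.pyRange 1 ((S.length : Int) + 1) 1).foldl
    (fun pv n =>
      (findsubsets S n.toNat).foldl (fun pv s => PySem.Set.add pv s.sum) pv)
    []

-- ===== PORT B =====
-- one step of the suffix DP: prepend element x to the processed suffix
def pvStep (table : List (List Int)) (x : Int) : List (List Int) :=
  let shifted := table.map (fun row => row.map (fun s => x + s))
  [0] :: ((shifted.zip (table.tail ++ [[]])).map (fun p => p.1 ++ p.2))

def getAllPossibleSums_alt (Ds : List Int) : List Int :=
  let xs := PySem.List.dedup Ds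
  let table := xs.reverse.foldl pvStep [[0]]
  table.tail.foldl (fun out row => PySem.Set.update out row) []

-- ===== PRECONDITION & SPEC =====
def Spec_getAllPossibleSums (Ds : List Int) (out : List Int) : Prop := out = getAllPossibleSums_alt Ds
instance (Ds : List Int) (out : List Int) : Decidable (Spec_getAllPossibleSums Ds out) := by unfold Spec_getAllPossibleSums; infer_instance

-- ===== CLAIM (what is proved, stated in full; the proofs are below) =====
def Claim_equal_getAllPossibleSums : Prop := ∀ (Ds : List Int), Dom_getAllPossibleSums Ds → Spec_getAllPossibleSums Ds (getAllPossibleSums Ds)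

-- ===== LEMMAS AND PROOFS =====

-- sums of the k-element subsets of xs, lexicographic subset order (common spec)
def pvC : List Int → Nat → List Int
  | _, 0 => [0]
  | [], _ + 1 => []
  | x :: r, k + 1 => (pvC r k).map (fun s => x + s) ++ pvC r (k + 1)

theorem pvC_nil_of_gt : ∀ (xs : List Int) (k : Nat), xs.length < k → pvC xs k = [] := by
  intro xs; induction xs with
  | nil => intro k hk; cases k with | zero => omega | succ k => rfl
  | cons x r ih =>
      intro k hk; cases k with
      | zero => omega
      | succ k =>
          simp only [pvC]
          rw [ih k (by simpa using hk), ih (k + 1) (by simp at hk ⊢; omega)]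
          rfl

theorem map_sum_pvCombos : ∀ (xs : List Int) (k : Nat),
    (pvCombos k xs).map List.sum = pvC xs k := by
  intro xs; induction xs with
  | nil => intro k; cases k with | zero => rfl | succ k => rfl
  | cons x r ih =>
      intro k; cases k with
      | zero => rfl
      | succ k =>
          simp only [pvCombos, pvC, List.map_append, List.map_map, ← ih]
          congr 1

theorem pvCombos_subset : ∀ (xs : List Int) (k : Nat) (t : List Int),
    t ∈ pvCombos k xs → t ⊆ xs := by
  intro xs; induction xs with
  | nil =>
      intro k t ht; cases k with
      | zero => simp [pvCombos] at ht; simp [ht]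
      | succ k => simp [pvCombos] at ht
  | cons x r ih =>
      intro k t ht; cases k with
      | zero => simp [pvCombos] at ht; simp [ht]
      | succ k =>
          simp only [pvCombos, List.mem_append, List.mem_map] at ht
          rcases ht with ⟨u, hu, rfl⟩ | ht
          · exact List.cons_subset_cons x (ih k u hu)
          · exact List.Subset.trans (ih (k + 1) t ht) (List.subset_cons_self x r)

theorem pvCombos_nodup : ∀ (xs : List Int) (k : Nat), xs.Nodup → (pvCombos k xs).Nodup := by
  intro xs; induction xs with
  | nil => intro k _; cases k with | zero => simp [pvCombos] | succ k => simp [pvCombos]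
  | cons x r ih =>
      intro k hnd; cases k with
      | zero => simp [pvCombos]
      | succ k =>
          rcases List.nodup_cons.mp hnd with ⟨hx, hr⟩
          simp only [pvCombos]
          apply List.Nodup.append
          · exact (ih k hr).map (fun a b h => by simpa using h)
          · exact ih (k + 1) hr
          · intro t ht1 ht2
            simp only [List.mem_map] at ht1
            rcases ht1 with ⟨u, _, rfl⟩
            exact hx (pvCombos_subset r (k + 1) (x :: u) ht2 (by simp))

theorem pvStep_spec (r : List Int) (x : Int) :
    pvStep ((List.range (r.length + 1)).map (pvC r)) x
      = (List.range ((x :: r).length + 1)).map (pvC (x :: r)) := by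
  have htail : ((List.range (r.length + 1)).map (pvC r)).tail
      = (List.range r.length).map (fun k => pvC r (k + 1)) := by
    rw [List.range_succ_eq_map]; simp [List.map_map]
  simp only [pvStep, htail, List.length_cons]
  apply List.ext_getElem
  · simp [List.length_zip]
  · intro i h1 h2
    cases i with
    | zero => simp [pvC]
    | succ j =>
      have hj1 : j < r.length + 1 := by
        simp only [List.length_map, List.length_range] at h2; omega
      simp only [List.getElem_cons_succ, List.getElem_map, List.getElem_zip,
        List.getElem_range]
      by_cases hj : j < r.length
      · rw [List.getElem_append_left (by simpa using hj)]
        simp [pvC]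
      · have hje : j = r.length := by omega
        subst hje
        rw [List.getElem_append_right (by simp)]
        simp [pvC, pvC_nil_of_gt r (r.length + 1) (by omega)]

theorem pvTable_spec : ∀ (xs : List Int),
    xs.reverse.foldl pvStep [[0]] = (List.range (xs.length + 1)).map (pvC xs) := by
  intro xs
  rw [List.foldl_reverse]
  induction xs with
  | nil => rfl
  | cons x r ih =>
      simp only [List.foldr_cons, ih]
      exact pvStep_spec r x

theorem getAllPossibleSums_eq (Ds : List Int) :
    getAllPossibleSums Ds = getAllPossibleSums_alt Ds := by
  simp only [getAllPossibleSums, getAllPossibleSums_alt]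
  rw [PySem.List.dedup_eq_ofList, pvTable_spec]
  set S := PySem.Set.ofList Ds with hS
  have hnd : S.Nodup := PySem.Set.nodup_ofList Ds
  have htail : ((List.range (S.length + 1)).map (pvC S)).tail
      = (List.range S.length).map (fun k => pvC S (k + 1)) := by
    rw [List.range_succ_eq_map]; simp [List.map_map]
  rw [htail]
  rw [PySem.List.pyRange_one]
  have hbt : (((S.length : Int) + 1) - 1).toNat = S.length := by omega
  rw [hbt, List.foldl_map, List.foldl_map]
  apply PySem.List.foldl_congr_mem
  intro acc k hk
  have hk' : ((1 : Int) + (k : Int)).toNat = k + 1 := by omega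
  rw [hk']
  have hfs : findsubsets S (k + 1) = pvCombos (k + 1) S :=
    PySem.Set.ofList_eq_self_of_nodup _ (pvCombos_nodup S (k + 1) hnd)
  rw [hfs, ← map_sum_pvCombos S (k + 1)]
  change _ = ((pvCombos (k + 1) S).map List.sum).foldl PySem.Set.add acc
  rw [List.foldl_map]

-- ===== VERDICT (by name: the statement is the Claim_ definition above) =====
theorem getAllPossibleSums_spec : Claim_equal_getAllPossibleSums := by
  intro Ds _
  unfold Spec_getAllPossibleSums
  exact getAllPossibleSums_eq Ds
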